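-- pv_equiv track=rewrite | github.com/MattyB709/CompetitiveProgramming | number_theory/fact2.py | generate_hamming
-- ===== SOURCE A (Python) =====
-- def generate_hamming(n):
--     """
--     Generate all numbers of the form 2^a * 5^b that are <= n (aka hamming numbers)
--     """
--     hs = set()
--     a = 1
--     while a <= n:
--         b = a
--         while b <= n:
--             hs.add(b)
--             b *= 5
--         a *= 2
--     return hs
-- ===== SOURCE B (Python) =====
-- def generate_hamming(n):
--     """
--     Same set of 2^a * 5^b numbers <= n, computed as the closure of {1} under
--     multiplication by 2 and 5 with an explicit worklist (stack): each number is
--     produced exactly once because only numbers not divisible by 5 are doubled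
--     (every 2^a*5^b has the unique derivation '2s first, then 5s').
--     """
--     hs = set()
--     stack = [1] if n >= 1 else []
--     while stack:
--         x = stack.pop()
--         hs.add(x)
--         if x % 5 and 2 * x <= n:
--             stack.append(2 * x)
--         if 5 * x <= n:
--             stack.append(5 * x)
--     return hs
-- ===== Notes on version B (the rewrite author's own statement) =====
-- stated objective: alternative
-- what changed: Replaces A's nested running-product while loops over exponents by an explicit worklist (DFS stack) that closes the seed element under doubling and quintupling, with a divisibility guard ensuring every number is generated exactly once.
import Mathlib
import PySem

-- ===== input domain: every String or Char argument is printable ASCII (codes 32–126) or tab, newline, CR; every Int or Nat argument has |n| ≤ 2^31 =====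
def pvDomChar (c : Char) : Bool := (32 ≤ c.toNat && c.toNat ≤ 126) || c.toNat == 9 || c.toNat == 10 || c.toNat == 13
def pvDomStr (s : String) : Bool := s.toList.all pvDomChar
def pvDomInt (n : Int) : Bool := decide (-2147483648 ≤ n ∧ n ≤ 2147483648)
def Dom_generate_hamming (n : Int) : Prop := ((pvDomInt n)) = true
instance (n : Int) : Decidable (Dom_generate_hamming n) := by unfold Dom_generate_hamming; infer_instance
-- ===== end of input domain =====

-- B replaces A's nested power loops by a worklist (explicit DFS stack) computing the
-- closure of the seed element under doubling and quintupling, doubling only numbers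
-- with no factor of five so each number is generated exactly once
-- (objective: alternative algorithm, same cost).
-- The loops are ported with fuel bounds that provably exceed their iteration counts,
-- so the fuel guards never change the computation.

-- ===== PORT A =====
-- inner 'while b <= n: hs.add(b); b *= 5'
def pvLoop5 (fuel : Nat) (n b : Int) (hs : PySem.Set Int) : PySem.Set Int :=
  match fuel with
  | 0 => hs
  | f + 1 => if b ≤ n then pvLoop5 f n (b * 5) (PySem.Set.add hs b) else hs

-- outer 'while a <= n: <inner loop>; a *= 2' (the inner loop always restarts with fuel5)
def pvLoop2 (fuel5 fuel : Nat) (n a : Int) (hs : PySem.Set Int) : PySem.Set Int :=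
  match fuel with
  | 0 => hs
  | f + 1 => if a ≤ n then pvLoop2 fuel5 f n (a * 2) (pvLoop5 fuel5 n a hs) else hs

def generate_hamming (n : Int) : List Int :=
  pvLoop2 n.toNat n.toNat n 1 PySem.Set.empty

-- ===== PORT B =====
-- 'while stack: x = stack.pop(); hs.add(x); if x % 5 and 2*x <= n: push 2*x; if 5*x <= n: push 5*x'
-- The Python stack (append/pop at the right end) is modelled with the list head as the
-- top of the stack: pop = take the head, push = cons; pushing 2*x then 5*x therefore
-- conses 2*x first so that 5*x ends up on top, exactly Python's pop order.
def pvDfs (fuel : Nat) (n : Int) (stack : List Int) (hs : PySem.Set Int) : PySem.Set Int :=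
  match fuel, stack with
  | 0, _ => hs
  | _ + 1, [] => hs
  | f + 1, x :: rest =>
      let hs' := PySem.Set.add hs x
      let s1 := if x % 5 ≠ 0 ∧ 2 * x ≤ n then (2 * x) :: rest else rest
      let s2 := if 5 * x ≤ n then (5 * x) :: s1 else s1
      pvDfs f n s2 hs'

def generate_hamming_alt (n : Int) : List Int :=
  pvDfs (n.toNat * n.toNat) n (if 1 ≤ n then [1] else []) PySem.Set.empty

-- ===== PRECONDITION & SPEC =====
def Spec_generate_hamming (n : Int) (out : List Int) : Prop := out = generate_hamming_alt n
instance (n : Int) (out : List Int) : Decidable (Spec_generate_hamming n out) := by unfold Spec_generate_hamming; infer_instance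

-- ===== CLAIM (what is proved, stated in full; the proofs are below) =====
def Claim_equal_generate_hamming : Prop := ∀ (n : Int), Dom_generate_hamming n → Spec_generate_hamming n (generate_hamming n)

-- ===== LEMMAS AND PROOFS =====

-- the powers-of-5 chain starting at b: the list A's inner loop adds to hs
def pvPows5 (fuel : Nat) (n b : Int) : List Int :=
  match fuel with
  | 0 => []
  | f + 1 => if b ≤ n then b :: pvPows5 f n (b * 5) else []

-- the list A's outer loop pushes into hs: concatenation of the powers-of-5 chains
def pvA2 (fuel5 fuel : Nat) (n a : Int) : List Int :=
  match fuel with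
  | 0 => []
  | f + 1 => if a ≤ n then pvPows5 fuel5 n a ++ pvA2 fuel5 f n (a * 2) else []

-- the emission order of B's DFS from a single stack entry x (x is emitted
-- unconditionally, exactly as the machine pops and adds it)
def pvTree (fuel : Nat) (n x : Int) : List Int :=
  match fuel with
  | 0 => []
  | f + 1 =>
      x :: ((if 5 * x ≤ n then pvTree f n (5 * x) else []) ++
            (if x % 5 ≠ 0 ∧ 2 * x ≤ n then pvTree f n (2 * x) else []))

theorem pvLoop5_eq (f : Nat) (n b : Int) (hs : PySem.Set Int) :
    pvLoop5 f n b hs = PySem.Set.update hs (pvPows5 f n b) := by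
  induction f generalizing b hs with
  | zero => simp [pvLoop5, pvPows5, PySem.Set.update]
  | succ f ih =>
    rw [pvLoop5, pvPows5]
    split
    · rw [ih]; simp [PySem.Set.update]
    · simp [PySem.Set.update]

theorem pvLoop2_eq (f5 f : Nat) (n a : Int) (hs : PySem.Set Int) :
    pvLoop2 f5 f n a hs = PySem.Set.update hs (pvA2 f5 f n a) := by
  induction f generalizing a hs with
  | zero => simp [pvLoop2, pvA2, PySem.Set.update]
  | succ f ih =>
    rw [pvLoop2, pvA2]
    split
    · rw [ih, pvLoop5_eq]; simp [PySem.Set.update, List.foldl_append]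
    · simp [PySem.Set.update]

theorem pvDfs_nil (f : Nat) (n : Int) (hs : PySem.Set Int) :
    pvDfs f n [] hs = hs := by
  cases f <;> rfl

-- chain lengths are bounded by their fuel
theorem len_pvPows5_le (f : Nat) (n b : Int) : (pvPows5 f n b).length ≤ f := by
  induction f generalizing b with
  | zero => simp [pvPows5]
  | succ f ih =>
    rw [pvPows5]
    split
    · simpa using Nat.succ_le_succ (ih (b * 5))
    · simp

theorem len_pvA2_le (f5 f : Nat) (n a : Int) : (pvA2 f5 f n a).length ≤ f * f5 := by
  induction f generalizing a with
  | zero => simp [pvA2]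
  | succ f ih =>
    rw [pvA2]
    split
    · have := len_pvPows5_le f5 n a
      have := ih (a * 2)
      simp only [List.length_append, Nat.succ_mul]
      omega
    · simp

-- pvPows5 does not depend on the fuel once the fuel is large enough
theorem pvPows5_congr (f g : Nat) (n q : Int) (hq : 1 ≤ q)
    (hf : n < q * 5 ^ f) (hg : n < q * 5 ^ g) :
    pvPows5 f n q = pvPows5 g n q := by
  induction f generalizing g q with
  | zero =>
    simp only [pow_zero, mul_one] at hf
    cases g with
    | zero => rfl
    | succ g => rw [pvPows5, pvPows5, if_neg (by omega)]
  | succ f ih =>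
    cases g with
    | zero =>
      simp only [pow_zero, mul_one] at hg
      rw [pvPows5, pvPows5, if_neg (by omega)]
    | succ g =>
      rw [pvPows5, pvPows5]
      split
      · rw [ih g (q * 5) (by omega)
            (by rw [pow_succ] at hf; linarith [hf])
            (by rw [pow_succ] at hg; linarith [hg])]
      · rfl

-- a DFS node divisible by 5 has no 2-child: its emission list is a pure 5-chain
theorem pvTree_chain (f : Nat) (n y : Int) (h5 : y % 5 = 0) (hy : 1 ≤ y)
    (hyn : y ≤ n) (hf : n < y * 5 ^ f) :
    pvTree (f + 1) n y = pvPows5 (f + 1) n y := by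
  induction f generalizing y with
  | zero =>
    simp only [pow_zero, mul_one] at hf
    omega
  | succ f ih =>
    rw [pvTree, pvPows5, if_pos hyn]
    have h2 : ¬ (y % 5 ≠ 0 ∧ 2 * y ≤ n) := by
      intro h; exact h.1 h5
    rw [if_neg h2, List.append_nil]
    by_cases h : 5 * y ≤ n
    · rw [if_pos h, ih (5 * y) (by omega) (by omega) h
          (by rw [pow_succ] at hf; linarith [hf]),
          show y * 5 = 5 * y by ring]
    · rw [if_neg h, show y * 5 = 5 * y by ring, pvPows5, if_neg h]

-- 5 never divides a power of 2
theorem two_pow_mod5 (i : Nat) : (2 : Int) ^ i % 5 ≠ 0 := by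
  intro h
  have hdvd : (5 : Int) ∣ 2 ^ i := Int.dvd_of_emod_eq_zero h
  have hp : Prime (5 : Int) := by norm_num
  have := hp.dvd_of_dvd_pow hdvd
  omega

-- B's DFS emission order from 2^i is exactly A's chain concatenation
theorem pvTree_eq_pvA2 (n : Int) :
    ∀ (F fA f5 i : Nat), (2 : Int) ^ i ≤ n → n < 2 ^ i * 2 ^ F →
      n < 2 ^ i * 2 ^ fA → n < 5 ^ f5 →
      pvTree (F + 1) n (2 ^ i) = pvA2 f5 fA n (2 ^ i) := by
  intro F
  induction F with
  | zero =>
    intro fA f5 i hle hF _ _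
    simp only [pow_zero, mul_one] at hF
    omega
  | succ F ih =>
    intro fA f5 i hle hF hA h5
    have hx1 : (1 : Int) ≤ 2 ^ i := one_le_pow₀ (by norm_num)
    cases fA with
    | zero => simp only [pow_zero, mul_one] at hA; omega
    | succ g =>
      cases f5 with
      | zero => simp only [pow_zero] at h5; omega
      | succ h =>
        rw [pvTree, pvA2, if_pos hle, pvPows5, if_pos hle]
        have e5 : (if 5 * 2 ^ i ≤ n then pvTree (F + 1) n (5 * 2 ^ i) else [])
            = pvPows5 h n (2 ^ i * 5) := by
          by_cases hc : 5 * 2 ^ i ≤ n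
          · rw [if_pos hc,
                pvTree_chain F n (5 * 2 ^ i) (by omega) (by omega) hc
                  (by rw [pow_succ] at hF
                      calc n < 2 ^ i * (2 ^ F * 2) := hF
                        _ ≤ 5 * 2 ^ i * 5 ^ F := by
                            have h25 : (2 : Int) ^ F ≤ 5 ^ F :=
                              pow_le_pow_left₀ (by norm_num) (by norm_num) F
                            nlinarith),
                show (2 : Int) ^ i * 5 = 5 * 2 ^ i by ring]
            exact pvPows5_congr (F + 1) h n (5 * 2 ^ i) (by omega)
              (by rw [pow_succ]
                  have h25 : (2 : Int) ^ F ≤ 5 ^ F :=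
                    pow_le_pow_left₀ (by norm_num) (by norm_num) F
                  rw [pow_succ] at hF
                  nlinarith)
              (by rw [pow_succ] at h5; nlinarith)
          · rw [if_neg hc, show (2 : Int) ^ i * 5 = 5 * 2 ^ i by ring]
            cases h with
            | zero => rfl
            | succ h => rw [pvPows5, if_neg hc]
        have e2 : (if (2 : Int) ^ i % 5 ≠ 0 ∧ 2 * 2 ^ i ≤ n then pvTree (F + 1) n (2 * 2 ^ i) else [])
            = pvA2 (h + 1) g n (2 ^ i * 2) := by
          by_cases hc : 2 * 2 ^ i ≤ n
          · rw [if_pos ⟨two_pow_mod5 i, hc⟩,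
                show (2 : Int) * 2 ^ i = 2 ^ (i + 1) by ring]
            rw [show (2 : Int) ^ i * 2 = 2 ^ (i + 1) by ring]
            exact ih g (h + 1) (i + 1)
              (by rw [show (2:Int) ^ (i+1) = 2 * 2 ^ i by ring]; exact hc)
              (by rw [show (2:Int) ^ (i+1) * 2 ^ F = 2 ^ i * 2 ^ (F + 1) by ring]; exact hF)
              (by rw [show (2:Int) ^ (i+1) * 2 ^ g = 2 ^ i * 2 ^ (g + 1) by ring]; exact hA)
              h5
          · rw [if_neg (by intro h'; exact hc h'.2)]
            cases g with
            | zero => rfl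
            | succ g =>
              rw [pvA2, if_neg (by rw [show (2:Int) ^ i * 2 = 2 * 2 ^ i by ring]; exact hc)]
        rw [e5, e2, List.cons_append]

-- one DFS pop and its whole subtree, with exact fuel accounting
theorem pvDfs_run (n : Int) :
    ∀ (F : Nat) (x : Int) (rest : List Int) (hs : PySem.Set Int) (f : Nat),
      1 ≤ x → n < x * 2 ^ F →
      pvDfs ((pvTree (F + 1) n x).length + f) n (x :: rest) hs
        = pvDfs f n rest (PySem.Set.update hs (pvTree (F + 1) n x)) := by
  intro F
  induction F with
  | zero =>
    intro x rest hs f hx hF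
    simp only [pow_zero, mul_one] at hF
    have h5 : ¬ (5 * x ≤ n) := by omega
    have h2 : ¬ (x % 5 ≠ 0 ∧ 2 * x ≤ n) := by intro h; omega
    rw [pvTree, if_neg h5, if_neg h2]
    simp only [List.append_nil, List.length_cons, List.length_nil, Nat.zero_add]
    rw [show 0 + 1 + f = f + 1 by omega, pvDfs]
    simp only [if_neg h5, if_neg h2]
    simp [PySem.Set.update]
  | succ F ih =>
    intro x rest hs f hx hF
    rw [pvTree]
    have hupd : ∀ (c5 c2 : List Int),
        PySem.Set.update hs (x :: (c5 ++ c2))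
          = PySem.Set.update (PySem.Set.update (PySem.Set.add hs x) c5) c2 := by
      intro c5 c2; simp [PySem.Set.update, List.foldl_append]
    by_cases h5 : 5 * x ≤ n
    · by_cases h2 : x % 5 ≠ 0 ∧ 2 * x ≤ n
      · rw [if_pos h5, if_pos h2]
        set c5 := pvTree (F + 1) n (5 * x) with hc5
        set c2 := pvTree (F + 1) n (2 * x) with hc2
        have hlen : (x :: (c5 ++ c2)).length + f = (c5.length + (c2.length + f)) + 1 := by
          simp only [List.length_cons, List.length_append]; omega
        rw [hlen, pvDfs, if_pos h2, if_pos h5]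
        rw [ih (5 * x) (2 * x :: rest) _ (c2.length + f) (by omega)
            (by rw [pow_succ] at hF; nlinarith)]
        rw [ih (2 * x) rest _ f (by omega)
            (by rw [pow_succ] at hF; nlinarith)]
        rw [hupd]
      · rw [if_pos h5, if_neg h2]
        set c5 := pvTree (F + 1) n (5 * x) with hc5
        have hlen : (x :: (c5 ++ [])).length + f = (c5.length + f) + 1 := by
          simp only [List.length_cons, List.length_append, List.length_nil]; omega
        rw [hlen, pvDfs, if_neg h2, if_pos h5]
        rw [ih (5 * x) rest _ f (by omega)
            (by rw [pow_succ] at hF; nlinarith)]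
        rw [hupd]
        simp only [PySem.Set.update, List.foldl_nil]
        rfl
    · by_cases h2 : x % 5 ≠ 0 ∧ 2 * x ≤ n
      · rw [if_neg h5, if_pos h2]
        set c2 := pvTree (F + 1) n (2 * x) with hc2
        have hlen : (x :: ([] ++ c2)).length + f = (c2.length + f) + 1 := by
          simp only [List.length_cons, List.length_append, List.length_nil]; omega
        rw [hlen, pvDfs, if_pos h2, if_neg h5]
        rw [ih (2 * x) rest _ f (by omega)
            (by rw [pow_succ] at hF; nlinarith)]
        rw [hupd]
        simp only [PySem.Set.update, List.foldl_nil]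
        rfl
      · rw [if_neg h5, if_neg h2]
        have hlen : (x :: ([] ++ [])).length + f = f + 1 := by
          simp only [List.length_cons, List.length_append, List.length_nil]; omega
        rw [hlen, pvDfs, if_neg h2, if_neg h5]
        rw [hupd]
        simp [PySem.Set.update]

-- ===== VERDICT (by name: the statement is the Claim_ definition above) =====
theorem generate_hamming_spec : Claim_equal_generate_hamming := by
  intro n _
  unfold Spec_generate_hamming
  by_cases hn : 1 ≤ n
  · have hnn : (0 : Int) ≤ n := by omega
    have hpow2 : n < 2 ^ n.toNat := by
      have h1 : n.toNat < 2 ^ n.toNat := Nat.lt_two_pow_self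
      have : (n.toNat : Int) < ((2 ^ n.toNat : Nat) : Int) := by exact_mod_cast h1
      rw [Int.toNat_of_nonneg hnn] at this
      push_cast at this
      omega
    have hpow5 : n < 5 ^ n.toNat := by
      have h25 : (2 : Int) ^ n.toNat ≤ 5 ^ n.toNat :=
        pow_le_pow_left₀ (by norm_num) (by norm_num) n.toNat
      omega
    have hT : pvTree (n.toNat + 1) n 1 = pvA2 n.toNat n.toNat n 1 := by
      have := pvTree_eq_pvA2 n n.toNat n.toNat n.toNat 0
        (by simpa using hn) (by simpa using hpow2) (by simpa using hpow2) hpow5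
      simpa using this
    have hlen : (pvTree (n.toNat + 1) n 1).length ≤ n.toNat * n.toNat := by
      rw [hT]; exact len_pvA2_le n.toNat n.toNat n 1
    have hfuel : n.toNat * n.toNat
        = (pvTree (n.toNat + 1) n 1).length + (n.toNat * n.toNat - (pvTree (n.toNat + 1) n 1).length) := by
      omega
    rw [generate_hamming, generate_hamming_alt, if_pos hn, pvLoop2_eq, hfuel,
        pvDfs_run n n.toNat 1 [] PySem.Set.empty _ (by norm_num) (by simpa using hpow2),
        pvDfs_nil, hT]
  · rw [generate_hamming, generate_hamming_alt, if_neg hn,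
        show n.toNat = 0 by omega]
    rfl
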